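-- pv_equiv track=rewrite | github.com/vredara/gluster-swift | gluster/swift/common/DiskDir.py | filter_delimiter
-- ===== SOURCE A (Python) =====
-- def filter_delimiter(objects, delimiter, prefix, marker, path=None):
--     """
--     Accept a sorted list of strings, returning strings that:
--       1. begin with "prefix" (empty string matches all)
--       2. does not match the "path" argument
--       3. does not contain the delimiter in the given prefix length
--     """
--     assert delimiter
--     assert prefix is not None
--     skip_name = None
--     for object_name in objects:
--         if prefix and not object_name.startswith(prefix):
--             break
--         if path is not None:
--             if object_name == path:
--                 continue
--             if skip_name:
--                 if object_name < skip_name: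
--                     continue
--                 else:
--                     skip_name = None
--             end = object_name.find(delimiter, len(prefix))
--             if end >= 0 and (len(object_name) > (end + 1)):
--                 skip_name = object_name[:end] + chr(ord(delimiter) + 1)
--                 continue
--         else:
--             if skip_name:
--                 if object_name < skip_name:
--                     continue
--                 else:
--                     skip_name = None
--             end = object_name.find(delimiter, len(prefix))
--             if end > 0:
--                 dir_name = object_name[:end + 1]
--                 if dir_name != marker:
--                     yield dir_name
--                 skip_name = object_name[:end] + chr(ord(delimiter) + 1)
--                 continue
--         yield object_name
-- ===== SOURCE B (Python) =====
-- def filter_delimiter(objects, delimiter, prefix, marker, path=None):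
--     """
--     Same listing as A on a sorted `objects` list, but stateless: instead of
--     maintaining a skip_name marker and comparing every entry against it, each
--     entry is classified on its own (prefix, path, first delimiter after the
--     prefix) and consecutive duplicate directory names are collapsed.
--     """
--     assert delimiter
--     out = []
--     last_dir = None
--     plen = len(prefix)
--     for name in objects:
--         if prefix and not name.startswith(prefix):
--             break
--         end = name.find(delimiter, plen)
--         if path is not None:
--             if name != path and not (end >= 0 and len(name) > end + 1):
--                 out.append(name)
--         elif end > 0:
--             dir_name = name[:end + 1]
--             if dir_name != last_dir:
--                 last_dir = dir_name
--                 if dir_name != marker: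
--                     out.append(dir_name)
--         else:
--             out.append(name)
--     return out
-- ===== Notes on version B (the rewrite author's own statement) =====
-- stated objective: alternative
-- what changed: A drives a skip_name state machine (build a sentinel string name[:end]+chr(ord(delimiter)+1) and lexicographically compare every later entry against it); B is stateless per entry: one pass that classifies each name on its own (prefix, path, first delimiter after the prefix) and collapses consecutive equal directory names.
-- outside the precondition, e.g. on filter_delimiter(['b/x', 'a'], '/', '', '', None): A returns ['b/'], B returns ['b/', 'a']
import Mathlib
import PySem

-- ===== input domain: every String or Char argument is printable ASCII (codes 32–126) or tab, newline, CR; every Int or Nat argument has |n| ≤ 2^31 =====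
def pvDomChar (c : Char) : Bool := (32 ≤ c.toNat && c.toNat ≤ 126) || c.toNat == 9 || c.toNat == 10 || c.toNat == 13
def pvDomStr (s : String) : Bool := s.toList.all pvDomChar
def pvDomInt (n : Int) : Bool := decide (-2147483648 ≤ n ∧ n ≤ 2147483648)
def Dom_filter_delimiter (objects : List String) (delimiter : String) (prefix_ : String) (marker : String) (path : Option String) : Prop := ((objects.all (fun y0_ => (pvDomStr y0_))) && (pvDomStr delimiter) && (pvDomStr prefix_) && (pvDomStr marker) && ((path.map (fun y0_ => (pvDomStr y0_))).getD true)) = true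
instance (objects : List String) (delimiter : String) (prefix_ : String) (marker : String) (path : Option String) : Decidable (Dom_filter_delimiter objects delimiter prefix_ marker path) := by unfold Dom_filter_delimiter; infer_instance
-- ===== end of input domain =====

-- B replaces A's skip_name state machine by a stateless single pass that classifies each entry
-- on its own and collapses consecutive equal directory names (objective: alternative, same cost).

-- ===== PORT A =====

/-- `chr(ord(delimiter) + 1)`: `ord` needs a one-character delimiter (guaranteed by
    `Pre_filter_delimiter`); the fallback arm only makes the function total. -/
def pvSuccChar (delimiter : String) : Char :=
  Char.ofNat ((match delimiter.toList with | [c] => c | _ => ' ').toNat + 1)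

/-- The fall-through part of A's loop body in the `path is not None` block (everything after
    the `skip_name` check, which at that point is `None`): returns
    (items yielded by this iteration, new `skip_name`). -/
def pvAbodyP (delimiter prefix_ : String) (name : String) : List String × Option String :=
  let e := PySem.Str.findFrom name delimiter (PySem.Str.len prefix_) none
  -- if end >= 0 and (len(object_name) > (end + 1)): skip_name = ...; continue
  if 0 ≤ e ∧ PySem.Str.len name > e + 1 then
    ([], some (String.ofList (name.toList.take e.toNat ++ [pvSuccChar delimiter])))
  else
    ([name], none)  -- yield object_name

/-- The fall-through part of A's loop body in the `path is None` block. -/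
def pvAbodyN (delimiter prefix_ marker : String) (name : String) : List String × Option String :=
  let e := PySem.Str.findFrom name delimiter (PySem.Str.len prefix_) none
  -- if end > 0: dir_name = object_name[:end+1]; yield it unless == marker; skip_name = ...
  if 0 < e then
    ((if String.ofList (name.toList.take (e.toNat + 1)) ≠ marker
        then [String.ofList (name.toList.take (e.toNat + 1))] else []),
      some (String.ofList (name.toList.take e.toNat ++ [pvSuccChar delimiter])))
  else
    ([name], none)  -- yield object_name

/-- A's generator loop: list of yielded items; `skip` is `skip_name`. -/
def pvAloop (delimiter prefix_ marker : String) (path : Option String) :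
    List String → Option String → List String
  | [], _ => []
  | name :: rest, skip =>
    if prefix_ ≠ "" ∧ ¬ PySem.Str.startswith name prefix_ then []  -- break
    else
      match path with
      | some p =>
        if name = p then pvAloop delimiter prefix_ marker path rest skip  -- continue
        else
          match skip with
          | some sk =>
            if name < sk then pvAloop delimiter prefix_ marker path rest (some sk)  -- continue
            else  -- skip_name = None, fall through to the body
              (pvAbodyP delimiter prefix_ name).1 ++
                pvAloop delimiter prefix_ marker path rest (pvAbodyP delimiter prefix_ name).2
          | none =>
            (pvAbodyP delimiter prefix_ name).1 ++
              pvAloop delimiter prefix_ marker path rest (pvAbodyP delimiter prefix_ name).2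
      | none =>
        match skip with
        | some sk =>
          if name < sk then pvAloop delimiter prefix_ marker path rest (some sk)  -- continue
          else
            (pvAbodyN delimiter prefix_ marker name).1 ++
              pvAloop delimiter prefix_ marker path rest (pvAbodyN delimiter prefix_ marker name).2
        | none =>
          (pvAbodyN delimiter prefix_ marker name).1 ++
            pvAloop delimiter prefix_ marker path rest (pvAbodyN delimiter prefix_ marker name).2

def filter_delimiter (objects : List String) (delimiter : String) (prefix_ : String)
    (marker : String) (path : Option String) : List String :=
  pvAloop delimiter prefix_ marker path objects none

-- ===== PORT B =====

/-- B's loop: `lastDir` is `last_dir`, `out` the accumulator. -/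
def pvBloop (delimiter prefix_ marker : String) (path : Option String) :
    List String → Option String → List String → List String
  | [], _, out => out
  | name :: rest, lastDir, out =>
    if prefix_ ≠ "" ∧ ¬ PySem.Str.startswith name prefix_ then out  -- break
    else
      let e := PySem.Str.findFrom name delimiter (PySem.Str.len prefix_) none
      match path with
      | some p =>
        if name ≠ p ∧ ¬ (0 ≤ e ∧ PySem.Str.len name > e + 1) then
          pvBloop delimiter prefix_ marker path rest lastDir (out ++ [name])
        else
          pvBloop delimiter prefix_ marker path rest lastDir out
      | none =>
        if 0 < e then
          if some (String.ofList (name.toList.take (e.toNat + 1))) ≠ lastDir then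
            pvBloop delimiter prefix_ marker path rest
              (some (String.ofList (name.toList.take (e.toNat + 1))))
              (out ++ (if String.ofList (name.toList.take (e.toNat + 1)) ≠ marker
                        then [String.ofList (name.toList.take (e.toNat + 1))] else []))
          else
            pvBloop delimiter prefix_ marker path rest lastDir out
        else
          pvBloop delimiter prefix_ marker path rest lastDir (out ++ [name])

def filter_delimiter_alt (objects : List String) (delimiter : String) (prefix_ : String)
    (marker : String) (path : Option String) : List String :=
  pvBloop delimiter prefix_ marker path objects none []

-- ===== PRECONDITION & SPEC =====

/-- `True` iff A's loop body would build a `skip_name` from `name` (a delimiter split after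
    the prefix). Input-only: it looks at one entry with `find`/`len`, not at either port. -/
def pvTrig (delimiter prefix_ : String) (path : Option String) (name : String) : Bool :=
  match path with
  | some p =>
      decide (name ≠ p) &&
      decide (0 ≤ PySem.Str.findFrom name delimiter (PySem.Str.len prefix_) none) &&
      decide (PySem.Str.len name > PySem.Str.findFrom name delimiter (PySem.Str.len prefix_) none + 1)
  | none => decide (0 < PySem.Str.findFrom name delimiter (PySem.Str.len prefix_) none)

/-- The entries A scans: everything before the first entry that fails the prefix test. -/
def pvScanned (prefix_ : String) (objects : List String) : List String :=
  objects.takeWhile (fun s => !(decide (prefix_ ≠ "" ∧ ¬ PySem.Str.startswith s prefix_ = true)))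

/-- Pre_ admits every input on which A never builds a `skip_name` (there A is a plain
    per-entry filter, so neither the list order nor the delimiter length matters), and
    otherwise requires a one-character delimiter and an ascending list: it excludes the empty
    delimiter (A raises AssertionError), longer delimiters on inputs that reach
    `ord(delimiter)` (TypeError), and unsorted lists that create a `skip_name`, where A's
    output is an accident of its implementation of the documented "sorted list" contract. -/
def Pre_filter_delimiter (objects : List String) (delimiter : String) (prefix_ : String)
    (marker : String) (path : Option String) : Prop :=
  (delimiter.length = 1 ∧ objects.Pairwise (fun a b => a.toList ≤ b.toList)) ∨
  (delimiter ≠ "" ∧ ∀ s ∈ pvScanned prefix_ objects, pvTrig delimiter prefix_ path s = false)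

instance (objects : List String) (delimiter : String) (prefix_ : String) (marker : String) (path : Option String) : Decidable (Pre_filter_delimiter objects delimiter prefix_ marker path) := by unfold Pre_filter_delimiter; infer_instance

def pvWitness_filter_delimiter : List String × String × String × String × Option String :=
  (["a/b", "a/c", "ab", "b"], "/", "a", "", none)

def Spec_filter_delimiter (objects : List String) (delimiter : String) (prefix_ : String) (marker : String) (path : Option String) (out : List String) : Prop := out = filter_delimiter_alt objects delimiter prefix_ marker path
instance (objects : List String) (delimiter : String) (prefix_ : String) (marker : String) (path : Option String) (out : List String) : Decidable (Spec_filter_delimiter objects delimiter prefix_ marker path out) := by unfold Spec_filter_delimiter; infer_instance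

-- ===== CLAIM (what is proved, stated in full; the proofs are below) =====
def Claim_equal_filter_delimiter : Prop := ∀ (objects : List String) (delimiter : String) (prefix_ : String) (marker : String) (path : Option String), Dom_filter_delimiter objects delimiter prefix_ marker path → Pre_filter_delimiter objects delimiter prefix_ marker path → Spec_filter_delimiter objects delimiter prefix_ marker path (filter_delimiter objects delimiter prefix_ marker path)

-- ===== LEMMAS AND PROOFS =====

-- Char order moves to `toNat`.
theorem pv_char_lt_iff (a b : Char) : a < b ↔ a.toNat < b.toNat := by
  rw [Char.lt_def]
  exact UInt32.lt_iff_toNat_lt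

theorem pv_char_eq_of_toNat (a b : Char) (h : a.toNat = b.toNat) : a = b := by
  have := Char.ofNat_toNat a
  rw [h, Char.ofNat_toNat] at this
  exact this.symm

-- Lexicographic facts about `List Char` (the order behind Python's string comparison).
theorem pv_proper_prefix_lt (u v : List Char) (hv : v ≠ []) : u < u ++ v := by
  show List.Lex (· < ·) _ _
  induction u with
  | nil => cases v with
    | nil => exact absurd rfl hv
    | cons x xs => exact List.Lex.nil
  | cons a u ih => exact List.Lex.cons ih

theorem pv_lt_succ (d c : Char) (hdc : c.toNat = d.toNat + 1) (u s : List Char)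
    (h : u ++ [d] <+: s) : s < u ++ [c] := by
  show List.Lex (· < ·) _ _
  induction u generalizing s with
  | nil =>
      obtain ⟨l', hl', -⟩ := List.cons_prefix_iff.mp h
      subst hl'
      exact List.Lex.rel ((pv_char_lt_iff d c).mpr (by omega))
  | cons a u ih =>
      obtain ⟨l', hl', hpre⟩ := List.cons_prefix_iff.mp h
      subst hl'
      exact List.Lex.cons (ih l' hpre)

-- KEY: between `u ++ [d]` and its successor string `u ++ [chr (ord d + 1)]` lie exactly the
-- strings extending `u ++ [d]`.
theorem pv_between (d c : Char) (hdc : c.toNat = d.toNat + 1) :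
    ∀ (u s : List Char), ¬ s < u ++ [d] → s < u ++ [c] → u ++ [d] <+: s := by
  intro u
  induction u with
  | nil =>
      intro s hge hlt
      cases s with
      | nil => exact absurd List.Lex.nil hge
      | cons x s' =>
          have hxc : x < c ∨ (x = c ∧ List.Lex (· < ·) s' []) := by
            cases hlt with
            | rel h => exact Or.inl h
            | cons h => exact Or.inr ⟨rfl, h⟩
          have hxc' : x < c := by
            rcases hxc with h | ⟨-, h⟩
            · exact h
            · cases h
          have hxd : ¬ x < d := fun h => hge (List.Lex.rel h)
          have hx : x = d := by
            apply pv_char_eq_of_toNat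
            have h1 : x.toNat < c.toNat := (pv_char_lt_iff x c).mp hxc'
            have h2 : ¬ x.toNat < d.toNat := fun h => hxd ((pv_char_lt_iff x d).mpr h)
            omega
          subst hx
          simp
  | cons a u ih =>
      intro s hge hlt
      cases s with
      | nil => exact absurd List.Lex.nil hge
      | cons x s' =>
          have hxa : ¬ x < a := fun h => hge (List.Lex.rel h)
          have hax : x = a := by
            cases hlt with
            | rel h => exact absurd h hxa
            | cons h => rfl
          subst hax
          have h1 : ¬ List.Lex (· < ·) s' (u ++ [d]) := by
            intro h; exact hge (List.Lex.cons h)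
          have h2 : List.Lex (· < ·) s' (u ++ [c]) := by
            cases hlt with
            | rel h => exact absurd h hxa
            | cons h => exact h
          show x :: u ++ [d] <+: x :: s'
          rw [List.cons_append]
          exact List.cons_prefix_iff.mpr ⟨s', rfl, ih s' h1 h2⟩

-- `find` of the single character `d` in `v ++ d :: t` with `d ∉ v` is `v.length`.
theorem pv_find_at (v t : List Char) (d : Char) (hv : d ∉ v) :
    PySem.Chars.find (v ++ d :: t) [d] = (v.length : Int) := by
  have hinf : [d] <:+: v ++ d :: t := ⟨v, t, by simp⟩
  have h0 : 0 ≤ PySem.Chars.find (v ++ d :: t) [d] :=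
    (PySem.Chars.find_nonneg_iff _ _).mpr hinf
  obtain ⟨hpre, hmin⟩ := PySem.Chars.find_spec h0
  set j := (PySem.Chars.find (v ++ d :: t) [d]).toNat with hj
  have hjle : j ≤ v.length := by
    by_contra h
    exact hmin v.length (by omega) (by simp)
  have hjge : ¬ j < v.length := by
    intro h
    have hjl : j < (v ++ d :: t).length := by simp; omega
    have hdrop : (v ++ d :: t).drop j = (v ++ d :: t)[j] :: (v ++ d :: t).drop (j + 1) :=
      List.drop_eq_getElem_cons hjl
    have hgj : (v ++ d :: t)[j] = v[j] := List.getElem_append_left h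
    rw [hdrop, hgj] at hpre
    obtain ⟨l', hl', -⟩ := List.cons_prefix_iff.mp hpre
    have : v[j] = d := by injection hl'
    exact hv (this ▸ List.getElem_mem h)
  have : j = v.length := by omega
  omega

-- `name.find(delimiter, len(prefix))` on a run element `u ++ d :: t`.
theorem pv_findFrom_run (delimiter : String) (d : Char) (hdel : delimiter.toList = [d])
    (prefix_ : String) (name : String) (u t : List Char) (hname : name.toList = u ++ d :: t)
    (hp : prefix_.length <= u.length) (hnd : d ∉ u.drop prefix_.length) :
    PySem.Str.findFrom name delimiter (PySem.Str.len prefix_) none = (u.length : Int) := by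
  have hlen : name.toList.length = u.length + 1 + t.length := by simp [hname]; omega
  have hk : prefix_.length ≤ name.toList.length := by omega
  rw [show (PySem.Str.len prefix_) = (prefix_.length : Int) from rfl]
  rw [PySem.Str.findFrom_eq]
  rw [PySem.Chars.findFrom_natCast name.toList delimiter.toList prefix_.length hk]
  rw [hname, hdel]
  rw [List.drop_append_of_le_length hp]
  rw [pv_find_at (u.drop prefix_.length) t d hnd]
  rw [List.length_drop]
  have hne : ((u.length - prefix_.length : Nat) : Int) ≠ -1 := by omega
  rw [if_neg hne]
  omega

-- The accumulator of B's loop is a prefix of the result.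
theorem pvBloop_append (delimiter prefix_ marker : String) (path : Option String) :
    ∀ (l : List String) (lastDir : Option String) (out : List String),
      pvBloop delimiter prefix_ marker path l lastDir out
        = out ++ pvBloop delimiter prefix_ marker path l lastDir [] := by
  intro l
  induction l with
  | nil => intro lastDir out; simp [pvBloop]
  | cons name rest ih =>
      intro lastDir out
      by_cases hbrk : (prefix_ ≠ "" ∧ ¬ PySem.Str.startswith name prefix_ = true)
      · simp only [pvBloop, if_pos hbrk]
        simp
      · cases path with
        | some p =>
            by_cases hcond : (name ≠ p ∧ ¬ (0 ≤ PySem.Str.findFrom name delimiter (PySem.Str.len prefix_) none ∧ PySem.Str.len name > PySem.Str.findFrom name delimiter (PySem.Str.len prefix_) none + 1))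
            · simp only [pvBloop, if_neg hbrk, if_pos hcond]
              rw [ih, ih _ ([] ++ [name])]
              simp
            · simp only [pvBloop, if_neg hbrk, if_neg hcond]
              exact ih _ _
        | none =>
            by_cases hpos : (0 < PySem.Str.findFrom name delimiter (PySem.Str.len prefix_) none)
            · by_cases hdir : (some (String.ofList (name.toList.take ((PySem.Str.findFrom name delimiter (PySem.Str.len prefix_) none).toNat + 1))) ≠ lastDir)
              · simp only [pvBloop, if_neg hbrk, if_pos hpos, if_pos hdir]
                rw [ih, ih _ ([] ++ _)]
                simp
              · simp only [pvBloop, if_neg hbrk, if_pos hpos, if_neg hdir]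
                exact ih _ _
            · simp only [pvBloop, if_neg hbrk, if_neg hpos]
              rw [ih, ih _ ([] ++ [name])]
              simp

-- Invariant tying A's `skip_name` to the remaining input, `path is not None` case.
def pvGoodS (pfxLen : Nat) (d c : Char) (l : List String) : Option String → Prop
  | none => True
  | some v => ∃ u : List Char, v.toList = u ++ [c] ∧ pfxLen ≤ u.length ∧
      d ∉ u.drop pfxLen ∧ ∀ s ∈ l, u ++ [d] < s.toList

-- Invariant tying A's `skip_name` and B's `last_dir` to the remaining input, `path is None` case.
def pvGoodN (pfxLen : Nat) (d c : Char) (l : List String) :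
    Option String → Option String → Prop
  | none, none => True
  | none, some dir => ∀ s ∈ l, ¬ dir.toList <+: s.toList
  | some v, lastDir => ∃ u : List Char, v.toList = u ++ [c] ∧
      lastDir = some (String.ofList (u ++ [d])) ∧ pfxLen ≤ u.length ∧ 0 < u.length ∧
      d ∉ u.drop pfxLen ∧ ∀ s ∈ l, u ++ [d] ≤ s.toList

-- A prefix is `≤` in the lexicographic order.
theorem pv_prefix_le (u s : List Char) (h : u <+: s) : u ≤ s := by
  obtain ⟨t, rfl⟩ := h
  cases t with
  | nil => simp
  | cons x xs => exact le_of_lt (pv_proper_prefix_lt u (x :: xs) (by simp))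

-- An element that survives the break test is at least as long as the prefix.
theorem pv_klen (prefix_ name : String)
    (hbrk : ¬ (prefix_ ≠ "" ∧ ¬ PySem.Str.startswith name prefix_ = true)) :
    prefix_.length ≤ name.toList.length := by
  by_cases hpe : prefix_ = ""
  · simp [hpe]
  · have hsw : PySem.Str.startswith name prefix_ = true := by
      by_contra h
      exact hbrk ⟨hpe, h⟩
    have := (PySem.Chars.startswith_iff name.toList prefix_.toList).mp
      (by rw [← PySem.Str.startswith_eq]; exact hsw)
    calc prefix_.length = prefix_.toList.length := rfl
      _ ≤ name.toList.length := this.length_le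

-- A run element (a string between `u ++ [d]` and its successor) decomposes as `u ++ d :: t`,
-- and its `find` is `u.length`.
theorem pv_run_elem (delimiter : String) (d : Char) (hdel : delimiter.toList = [d])
    (hc : (pvSuccChar delimiter).toNat = d.toNat + 1) (prefix_ : String) (u : List Char)
    (hku : prefix_.length ≤ u.length) (hnd : d ∉ u.drop prefix_.length) (name : String)
    (hlb : ¬ name.toList < u ++ [d]) (hub : name.toList < u ++ [pvSuccChar delimiter]) :
    ∃ t : List Char, name.toList = u ++ d :: t ∧
      PySem.Str.findFrom name delimiter (PySem.Str.len prefix_) none = (u.length : Int) ∧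
      PySem.Str.len name = (u.length : Int) + 1 + t.length := by
  have hpre : u ++ [d] <+: name.toList := pv_between d _ hc u name.toList hlb hub
  obtain ⟨t, ht⟩ := hpre
  have hname : name.toList = u ++ d :: t := by rw [← ht]; simp
  refine ⟨t, hname, pv_findFrom_run delimiter d hdel prefix_ name u t hname hku hnd, ?_⟩
  show ((name.toList.length : Int)) = _
  rw [hname]
  simp only [List.length_append, List.length_cons]
  push_cast
  omega

-- The skip_name built from a freshly found delimiter position satisfies the invariant facts.
theorem pv_new_skip (delimiter : String) (d : Char) (hdel : delimiter.toList = [d])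
    (prefix_ : String) (name : String) (hklen : prefix_.length ≤ name.toList.length)
    (e : Int) (he : e = PySem.Str.findFrom name delimiter (PySem.Str.len prefix_) none)
    (h0 : 0 ≤ e) :
    ∃ t : List Char, name.toList = name.toList.take e.toNat ++ d :: t ∧
      (name.toList.take e.toNat).length = e.toNat ∧
      prefix_.length ≤ e.toNat ∧
      d ∉ (name.toList.take e.toNat).drop prefix_.length ∧
      PySem.Str.len name = (e.toNat : Int) + 1 + t.length := by
  have hff : PySem.Str.findFrom name delimiter (PySem.Str.len prefix_) none
      = PySem.Chars.findFrom name.toList delimiter.toList (prefix_.length : Int) none := by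
    rw [show (PySem.Str.len prefix_) = (prefix_.length : Int) from rfl, PySem.Str.findFrom_eq]
  have hne : PySem.Chars.findFrom name.toList delimiter.toList (prefix_.length : Int) none ≠ -1 := by
    rw [← hff, ← he]; omega
  obtain ⟨hk_le, hpre, hmin⟩ :=
    PySem.Chars.findFrom_natCast_spec name.toList delimiter.toList prefix_.length hklen hne
  rw [← hff, ← he] at hk_le hpre hmin
  rw [hdel] at hpre hmin
  obtain ⟨l', hl', -⟩ := List.cons_prefix_iff.mp hpre
  have hilt : e.toNat < name.toList.length := by
    by_contra h
    rw [List.drop_eq_nil_of_le (by omega)] at hl'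
    simp at hl'
  have hname : name.toList = name.toList.take e.toNat ++ d :: l' := by
    conv_lhs => rw [← List.take_append_drop e.toNat name.toList]
    rw [hl']
  have htl : (name.toList.take e.toNat).length = e.toNat := by
    rw [List.length_take]
    omega
  have hke : prefix_.length ≤ e.toNat := by omega
  refine ⟨l', hname, htl, hke, ?_, ?_⟩
  · intro hmem
    rw [List.drop_take] at hmem
    obtain ⟨m, hm, hval⟩ := List.mem_iff_getElem.mp hmem
    have hmlen : m < e.toNat - prefix_.length := by
      rw [List.length_take, List.length_drop] at hm
      omega
    have hmd : m < (name.toList.drop prefix_.length).length := by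
      rw [List.length_drop]
      omega
    have hval' : (name.toList.drop prefix_.length)[m] = d := by
      rw [← hval]
      simp [List.getElem_take]
    apply hmin (prefix_.length + m) (by omega) (by omega)
    have hidx : (prefix_.length + m) < name.toList.length := by omega
    rw [List.drop_eq_getElem_cons hidx]
    have hgd : name.toList[prefix_.length + m] = d := by
      rw [← hval']
      simp [List.getElem_drop]
    rw [hgd]
    simp
  · show ((name.toList.length : Int)) = _
    conv_lhs => rw [hname]
    simp only [List.length_append, List.length_cons, htl]
    push_cast
    omega

theorem pv_main_some (delimiter prefix_ marker p : String) (d : Char)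
    (hdel : delimiter.toList = [d]) (hc : (pvSuccChar delimiter).toNat = d.toNat + 1) :
    ∀ (l : List String), l.Pairwise (· ≤ ·) →
      ∀ (sk lastDir : Option String), pvGoodS prefix_.length d (pvSuccChar delimiter) l sk →
        pvAloop delimiter prefix_ marker (some p) l sk
          = pvBloop delimiter prefix_ marker (some p) l lastDir [] := by
  intro l
  induction l with
  | nil => intro _ sk lastDir _; cases sk <;> simp [pvAloop, pvBloop]
  | cons name rest ih =>
      intro hpw sk lastDir hgood
      obtain ⟨hle, hpw'⟩ := List.pairwise_cons.mp hpw
      have goodS_mono : ∀ sk', pvGoodS prefix_.length d (pvSuccChar delimiter) (name :: rest) sk' →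
          pvGoodS prefix_.length d (pvSuccChar delimiter) rest sk' := by
        intro sk' h
        cases sk' with
        | none => trivial
        | some v =>
            obtain ⟨u, h1, h2, h3, h4⟩ := h
            exact ⟨u, h1, h2, h3, fun s hs => h4 s (List.mem_cons_of_mem _ hs)⟩
      by_cases hbrk : (prefix_ ≠ "" ∧ ¬ PySem.Str.startswith name prefix_ = true)
      · cases sk <;> simp only [pvAloop, pvBloop, if_pos hbrk]
      · have hklen : prefix_.length ≤ name.toList.length := pv_klen prefix_ name hbrk
        by_cases hp : name = p
        · -- A: `continue` with skip unchanged; B drops `name`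
          have hB : pvBloop delimiter prefix_ marker (some p) (name :: rest) lastDir []
              = pvBloop delimiter prefix_ marker (some p) rest lastDir [] := by
            simp only [pvBloop, if_neg hbrk]
            rw [if_neg (by simp [hp])]
          rw [hB]
          cases sk with
          | none =>
              simp only [pvAloop, if_neg hbrk, if_pos hp]
              exact ih hpw' none lastDir trivial
          | some skv =>
              simp only [pvAloop, if_neg hbrk, if_pos hp]
              exact ih hpw' (some skv) lastDir (goodS_mono _ hgood)
        · -- the shared fall-through body (skip_name is None at this point in A)
          have hbody : ∀ lastDir',
              (pvAbodyP delimiter prefix_ name).1 ++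
                  pvAloop delimiter prefix_ marker (some p) rest
                    (pvAbodyP delimiter prefix_ name).2
                = pvBloop delimiter prefix_ marker (some p) (name :: rest) lastDir' [] := by
            intro lastDir'
            by_cases hcond : (0 ≤ PySem.Str.findFrom name delimiter (PySem.Str.len prefix_) none ∧ PySem.Str.len name > PySem.Str.findFrom name delimiter (PySem.Str.len prefix_) none + 1)
            · -- A creates a new skip_name and yields nothing; B drops `name`
              obtain ⟨t, hname, htl, hke, hnd, hlen⟩ :=
                pv_new_skip delimiter d hdel prefix_ name hklen _ rfl hcond.1
              have htne : t ≠ [] := by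
                intro hteq
                rw [hteq] at hlen
                simp only [List.length_nil, Nat.cast_zero, add_zero] at hlen
                have := hcond.1
                have := hcond.2
                omega
              have hgood' : pvGoodS prefix_.length d (pvSuccChar delimiter) rest
                  (some (String.ofList (name.toList.take (PySem.Str.findFrom name delimiter (PySem.Str.len prefix_) none).toNat ++ [pvSuccChar delimiter]))) := by
                refine ⟨name.toList.take (PySem.Str.findFrom name delimiter (PySem.Str.len prefix_) none).toNat,
                  by simp, by rw [htl]; exact hke, hnd, ?_⟩
                intro s hs
                have h1 : (name.toList.take (PySem.Str.findFrom name delimiter (PySem.Str.len prefix_) none).toNat) ++ [d] < name.toList := by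
                  have hsplit : name.toList
                      = (name.toList.take (PySem.Str.findFrom name delimiter (PySem.Str.len prefix_) none).toNat ++ [d]) ++ t := by
                    conv_lhs => rw [hname]
                    simp
                  conv_rhs => rw [hsplit]
                  exact pv_proper_prefix_lt _ t htne
                have h2 : name.toList ≤ s.toList := String.le_iff_toList_le.mp (hle s hs)
                exact lt_of_lt_of_le h1 h2
              have hA : (pvAbodyP delimiter prefix_ name) =
                  ([], some (String.ofList (name.toList.take (PySem.Str.findFrom name delimiter (PySem.Str.len prefix_) none).toNat ++ [pvSuccChar delimiter]))) := by
                simp only [pvAbodyP]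
                simp only [if_pos hcond]
              rw [hA]
              simp only [List.nil_append]
              rw [ih hpw' _ lastDir' hgood']
              simp only [pvBloop, if_neg hbrk]
              rw [if_neg (by intro h; exact h.2 hcond)]
            · -- A yields `name`; so does B
              have hA : (pvAbodyP delimiter prefix_ name) = ([name], none) := by
                simp only [pvAbodyP]
                simp only [if_neg hcond]
              rw [hA]
              have hcnd : name ≠ p ∧ ¬ (0 ≤ PySem.Str.findFrom name delimiter (PySem.Str.len prefix_) none ∧ PySem.Str.len name > PySem.Str.findFrom name delimiter (PySem.Str.len prefix_) none + 1) := ⟨hp, hcond⟩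
              simp only [pvBloop, if_neg hbrk, if_pos hcnd]
              rw [pvBloop_append _ _ _ _ rest lastDir' ([] ++ [name])]
              rw [ih hpw' none lastDir' trivial]
              simp
          cases sk with
          | none =>
              simp only [pvAloop, if_neg hbrk, if_neg hp]
              exact hbody lastDir
          | some skv =>
              obtain ⟨u, hu, hku, hnd, hlb⟩ := hgood
              by_cases hlt : name < skv
              · -- run element: B drops it on its own evidence
                have hlbn : u ++ [d] < name.toList := hlb name (List.mem_cons_self)
                have hub : name.toList < u ++ [pvSuccChar delimiter] := by
                  rw [← hu]
                  exact String.lt_iff_toList_lt.mp hlt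
                obtain ⟨t, hname, he, hlen⟩ :=
                  pv_run_elem delimiter d hdel hc prefix_ u hku hnd name (lt_asymm hlbn) hub
                have htne : t ≠ [] := by
                  intro hteq
                  apply lt_irrefl (u ++ [d])
                  have hnd2 : name.toList = u ++ [d] := by rw [hname, hteq]
                  rwa [hnd2] at hlbn
                have hB : pvBloop delimiter prefix_ marker (some p) (name :: rest) lastDir []
                    = pvBloop delimiter prefix_ marker (some p) rest lastDir [] := by
                  simp only [pvBloop, if_neg hbrk]
                  have hncond : ¬ (name ≠ p ∧ ¬ (0 ≤ PySem.Str.findFrom name delimiter (PySem.Str.len prefix_) none ∧ PySem.Str.len name > PySem.Str.findFrom name delimiter (PySem.Str.len prefix_) none + 1)) := by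
                    intro h
                    apply h.2
                    constructor
                    · rw [he]; positivity
                    · rw [he, hlen]
                      have ht0 : 0 < t.length := List.length_pos_of_ne_nil htne
                      push_cast
                      omega
                  simp only [if_neg hncond]
                rw [hB]
                simp only [pvAloop, if_neg hbrk, if_neg hp, if_pos hlt]
                exact ih hpw' (some skv) lastDir (goodS_mono _ ⟨u, hu, hku, hnd, hlb⟩)
              · -- run over: A resets skip_name and falls through
                simp only [pvAloop, if_neg hbrk, if_neg hp, if_neg hlt]
                exact hbody lastDir

theorem pv_main_none (delimiter prefix_ marker : String) (d : Char)
    (hdel : delimiter.toList = [d]) (hc : (pvSuccChar delimiter).toNat = d.toNat + 1) :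
    ∀ (l : List String), l.Pairwise (· ≤ ·) →
      ∀ (sk lastDir : Option String), pvGoodN prefix_.length d (pvSuccChar delimiter) l sk lastDir →
        pvAloop delimiter prefix_ marker none l sk
          = pvBloop delimiter prefix_ marker none l lastDir [] := by
  intro l
  induction l with
  | nil => intro _ sk lastDir _; cases sk <;> simp [pvAloop, pvBloop]
  | cons name rest ih =>
      intro hpw sk lastDir hgood
      obtain ⟨hle, hpw'⟩ := List.pairwise_cons.mp hpw
      by_cases hbrk : (prefix_ ≠ "" ∧ ¬ PySem.Str.startswith name prefix_ = true)
      · cases sk <;> simp only [pvAloop, pvBloop, if_pos hbrk]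
      · have hklen : prefix_.length ≤ name.toList.length := pv_klen prefix_ name hbrk
        -- the shared fall-through body (skip_name is None at this point in A); needs the
        -- `last_dir` on B's side to be stale-safe for the whole remaining list
        have hbody : ∀ lastDir',
            pvGoodN prefix_.length d (pvSuccChar delimiter) (name :: rest) none lastDir' →
              (pvAbodyN delimiter prefix_ marker name).1 ++
                  pvAloop delimiter prefix_ marker none rest
                    (pvAbodyN delimiter prefix_ marker name).2
                = pvBloop delimiter prefix_ marker none (name :: rest) lastDir' [] := by
          intro lastDir' hstale
          by_cases hpos : (0 < PySem.Str.findFrom name delimiter (PySem.Str.len prefix_) none)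
          · -- a new directory entry
            obtain ⟨t, hname, htl, hke, hnd, hlen⟩ :=
              pv_new_skip delimiter d hdel prefix_ name hklen _ rfl (le_of_lt hpos)
            have hdirnew : name.toList.take ((PySem.Str.findFrom name delimiter (PySem.Str.len prefix_) none).toNat + 1)
                = name.toList.take (PySem.Str.findFrom name delimiter (PySem.Str.len prefix_) none).toNat ++ [d] := by
              conv_lhs => rw [hname]
              rw [show (name.toList.take (PySem.Str.findFrom name delimiter (PySem.Str.len prefix_) none).toNat ++ d :: t)
                    = (name.toList.take (PySem.Str.findFrom name delimiter (PySem.Str.len prefix_) none).toNat ++ [d]) ++ t by simp]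
              rw [show (PySem.Str.findFrom name delimiter (PySem.Str.len prefix_) none).toNat + 1
                    = (name.toList.take (PySem.Str.findFrom name delimiter (PySem.Str.len prefix_) none).toNat ++ [d]).length by
                  rw [List.length_append, htl]; rfl]
              exact List.take_left
            have hprefix : name.toList.take (PySem.Str.findFrom name delimiter (PySem.Str.len prefix_) none).toNat ++ [d] <+: name.toList := by
              refine ⟨t, ?_⟩
              conv_rhs => rw [hname]
              simp
            have hne_last : some (String.ofList (name.toList.take ((PySem.Str.findFrom name delimiter (PySem.Str.len prefix_) none).toNat + 1))) ≠ lastDir' := by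
              cases hld : lastDir' with
              | none => simp
              | some dirS =>
                  rw [hld] at hstale
                  intro heq
                  have hdS : dirS.toList = name.toList.take (PySem.Str.findFrom name delimiter (PySem.Str.len prefix_) none).toNat ++ [d] := by
                    have := Option.some.inj heq
                    rw [← this, hdirnew]
                    simp
                  exact hstale name (List.mem_cons_self) (hdS ▸ hprefix)
            have hA : (pvAbodyN delimiter prefix_ marker name) =
                ((if String.ofList (name.toList.take ((PySem.Str.findFrom name delimiter (PySem.Str.len prefix_) none).toNat + 1)) ≠ marker
                    then [String.ofList (name.toList.take ((PySem.Str.findFrom name delimiter (PySem.Str.len prefix_) none).toNat + 1))] else []),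
                  some (String.ofList (name.toList.take (PySem.Str.findFrom name delimiter (PySem.Str.len prefix_) none).toNat ++ [pvSuccChar delimiter]))) := by
              simp only [pvAbodyN]
              simp only [if_pos hpos]
            rw [hA]
            have hgood' : pvGoodN prefix_.length d (pvSuccChar delimiter) rest
                (some (String.ofList (name.toList.take (PySem.Str.findFrom name delimiter (PySem.Str.len prefix_) none).toNat ++ [pvSuccChar delimiter])))
                (some (String.ofList (name.toList.take ((PySem.Str.findFrom name delimiter (PySem.Str.len prefix_) none).toNat + 1)))) := by
              refine ⟨name.toList.take (PySem.Str.findFrom name delimiter (PySem.Str.len prefix_) none).toNat,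
                by simp, by rw [hdirnew], by rw [htl]; exact hke, by rw [htl]; omega, hnd, ?_⟩
              intro s hs
              exact le_trans (pv_prefix_le _ _ hprefix)
                (String.le_iff_toList_le.mp (hle s hs))
            rw [ih hpw' _ _ hgood']
            simp only [pvBloop, if_neg hbrk, if_pos hpos, if_pos hne_last]
            rw [pvBloop_append _ _ _ _ rest _ ([] ++ _)]
            simp
          · -- no delimiter after the prefix: both yield `name`, last_dir unchanged
            have hA : (pvAbodyN delimiter prefix_ marker name) = ([name], none) := by
              simp only [pvAbodyN]
              simp only [if_neg hpos]
            rw [hA]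
            have hstale' : pvGoodN prefix_.length d (pvSuccChar delimiter) rest none lastDir' := by
              cases hld : lastDir' with
              | none => trivial
              | some dirS =>
                  rw [hld] at hstale
                  exact fun s hs => hstale s (List.mem_cons_of_mem _ hs)
            rw [ih hpw' none lastDir' hstale']
            simp only [pvBloop, if_neg hbrk, if_neg hpos]
            rw [pvBloop_append _ _ _ _ rest lastDir' ([] ++ [name])]
            simp
        cases sk with
        | none =>
            simp only [pvAloop, if_neg hbrk]
            exact hbody lastDir hgood
        | some skv =>
            obtain ⟨u, hu, hlast, hku, hupos, hnd, hlb⟩ := hgood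
            by_cases hlt : name < skv
            · -- run element: B recomputes the same dir_name, equal to last_dir
              have hlbn : u ++ [d] ≤ name.toList := hlb name (List.mem_cons_self)
              have hub : name.toList < u ++ [pvSuccChar delimiter] := by
                rw [← hu]
                exact String.lt_iff_toList_lt.mp hlt
              obtain ⟨t, hname, he, hlen⟩ :=
                pv_run_elem delimiter d hdel hc prefix_ u hku hnd name (not_lt.mpr hlbn) hub
              have hdir : name.toList.take ((PySem.Str.findFrom name delimiter (PySem.Str.len prefix_) none).toNat + 1) = u ++ [d] := by
                rw [he]
                have h1 : ((u.length : Int)).toNat + 1 = (u ++ [d]).length := by simp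
                rw [h1]
                rw [show name.toList = (u ++ [d]) ++ t by rw [hname]; simp]
                exact List.take_left
              have hB : pvBloop delimiter prefix_ marker none (name :: rest) lastDir []
                  = pvBloop delimiter prefix_ marker none rest lastDir [] := by
                simp only [pvBloop, if_neg hbrk]
                have hpos : 0 < PySem.Str.findFrom name delimiter (PySem.Str.len prefix_) none := by
                  rw [he]
                  exact_mod_cast hupos
                have hdeq : ¬ (some (String.ofList (name.toList.take ((PySem.Str.findFrom name delimiter (PySem.Str.len prefix_) none).toNat + 1))) ≠ lastDir) := by
                  rw [hdir, hlast]
                  simp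
                simp only [if_pos hpos, if_neg hdeq]
              rw [hB]
              simp only [pvAloop, if_neg hbrk, if_pos hlt]
              exact ih hpw' (some skv) lastDir
                ⟨u, hu, hlast, hku, hupos, hnd, fun s hs => hlb s (List.mem_cons_of_mem _ hs)⟩
            · -- run over: A resets skip_name; B's stale last_dir can never match again
              have hstale : pvGoodN prefix_.length d (pvSuccChar delimiter) (name :: rest) none lastDir := by
                rw [hlast]
                intro s hs hpre
                have h1 : s.toList < u ++ [pvSuccChar delimiter] :=
                  pv_lt_succ d _ hc u s.toList (by simpa using hpre)
                have h2 : skv ≤ s := by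
                  rcases List.mem_cons.mp hs with rfl | hs'
                  · exact not_lt.mp hlt
                  · exact le_trans (not_lt.mp hlt) (hle s hs')
                have h3 : skv.toList ≤ s.toList := String.le_iff_toList_le.mp h2
                rw [hu] at h3
                exact absurd (lt_of_lt_of_le h1 h3) (lt_irrefl _)
              simp only [pvAloop, if_neg hbrk, if_neg hlt]
              exact hbody lastDir hstale

theorem pv_main_noskip (delimiter prefix_ marker : String) (path : Option String) :
    ∀ (l : List String),
      (∀ s ∈ pvScanned prefix_ l, pvTrig delimiter prefix_ path s = false) →
      ∀ (lastDir : Option String),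
        pvAloop delimiter prefix_ marker path l none
          = pvBloop delimiter prefix_ marker path l lastDir [] := by
  intro l
  induction l with
  | nil => intro _ lastDir; cases path <;> simp [pvAloop, pvBloop]
  | cons name rest ih =>
      intro hns lastDir
      by_cases hbrk : (prefix_ ≠ "" ∧ ¬ PySem.Str.startswith name prefix_ = true)
      · cases path <;> simp only [pvAloop, pvBloop, if_pos hbrk]
      · have hscan : pvScanned prefix_ (name :: rest) = name :: pvScanned prefix_ rest := by
          have hpred : (!(decide (prefix_ ≠ "" ∧ ¬ PySem.Str.startswith name prefix_ = true))) = true := by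
            simp only [Bool.not_eq_true', decide_eq_false_iff_not]
            exact hbrk
          simp only [pvScanned, List.takeWhile_cons, hpred]
          simp
        have hname_ns : pvTrig delimiter prefix_ path name = false := by
          apply hns
          rw [hscan]
          exact List.mem_cons_self
        have hrest : ∀ s ∈ pvScanned prefix_ rest, pvTrig delimiter prefix_ path s = false := by
          intro s hs
          apply hns
          rw [hscan]
          exact List.mem_cons_of_mem _ hs
        cases path with
        | some p =>
            by_cases hp : name = p
            · simp only [pvAloop, if_neg hbrk, if_pos hp]
              rw [ih hrest lastDir]
              simp only [pvBloop, if_neg hbrk]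
              rw [if_neg (by intro h; exact h.1 hp)]
            · have hcond : ¬ (0 ≤ PySem.Str.findFrom name delimiter (PySem.Str.len prefix_) none ∧ PySem.Str.len name > PySem.Str.findFrom name delimiter (PySem.Str.len prefix_) none + 1) := by
                intro hco
                have htr : pvTrig delimiter prefix_ (some p) name = true := by
                  simp only [pvTrig, Bool.and_eq_true]
                  exact ⟨⟨decide_eq_true hp, decide_eq_true hco.1⟩, decide_eq_true hco.2⟩
                rw [htr] at hname_ns
                simp at hname_ns
              have hA : (pvAbodyP delimiter prefix_ name) = ([name], none) := by
                simp only [pvAbodyP]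
                simp only [if_neg hcond]
              simp only [pvAloop, if_neg hbrk, if_neg hp]
              rw [hA]
              have hcnd : name ≠ p ∧ ¬ (0 ≤ PySem.Str.findFrom name delimiter (PySem.Str.len prefix_) none ∧ PySem.Str.len name > PySem.Str.findFrom name delimiter (PySem.Str.len prefix_) none + 1) := ⟨hp, hcond⟩
              simp only [pvBloop, if_neg hbrk, if_pos hcnd]
              rw [pvBloop_append _ _ _ _ rest lastDir ([] ++ [name])]
              rw [ih hrest lastDir]
              simp
        | none =>
            have hcond : ¬ (0 < PySem.Str.findFrom name delimiter (PySem.Str.len prefix_) none) := by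
              intro hco
              have htr : pvTrig delimiter prefix_ none name = true := by
                simp only [pvTrig]
                exact decide_eq_true hco
              rw [htr] at hname_ns
              simp at hname_ns
            have hA : (pvAbodyN delimiter prefix_ marker name) = ([name], none) := by
              simp only [pvAbodyN]
              simp only [if_neg hcond]
            simp only [pvAloop, if_neg hbrk]
            rw [hA]
            simp only [pvBloop, if_neg hbrk, if_neg hcond]
            rw [pvBloop_append _ _ _ _ rest lastDir ([] ++ [name])]
            rw [ih hrest lastDir]
            simp

-- ===== VERDICT (by name: the statement is the Claim_ definition above) =====
theorem filter_delimiter_spec : Claim_equal_filter_delimiter := by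
  intro objects delimiter prefix_ marker path hDom hPre
  show _ = filter_delimiter_alt objects delimiter prefix_ marker path
  rcases hPre with ⟨hlen, hsorted0⟩ | ⟨-, hns⟩
  · have hsorted : objects.Pairwise (· ≤ ·) :=
      hsorted0.imp (fun h => String.le_iff_toList_le.mpr h)
    obtain ⟨d, hdel⟩ : ∃ d, delimiter.toList = [d] := by
      have : delimiter.toList.length = 1 := hlen
      exact List.length_eq_one_iff.mp this
    have hc : (pvSuccChar delimiter).toNat = d.toNat + 1 := by
      have hdom : pvDomChar d = true := by
        simp only [Dom_filter_delimiter, Bool.and_eq_true] at hDom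
        have := hDom.1.1.1.2
        simp only [pvDomStr, hdel, List.all_cons, List.all_nil, Bool.and_eq_true] at this
        exact this.1
      have hval : (d.toNat + 1).isValidChar := by
        simp only [pvDomChar, Bool.or_eq_true, Bool.and_eq_true, beq_iff_eq,
          decide_eq_true_eq] at hdom
        exact Or.inl (by omega)
      simp [pvSuccChar, hdel, Char.toNat_ofNat, hval]
    cases path with
    | none =>
        exact pv_main_none delimiter prefix_ marker d hdel hc objects hsorted none none trivial
    | some p =>
        exact pv_main_some delimiter prefix_ marker p d hdel hc objects hsorted none none trivial
  · exact pv_main_noskip delimiter prefix_ marker path objects hns none
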